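-- pv_equiv track=rewrite | github.com/angel012912/ProblemsSolutions | SansaAndXOR.py | sansaXor
-- ===== SOURCE A (Python) =====
-- def sansaXor(arr):
--     # Write your code here
--     result = 0
--     n = len(arr)
--     for i in range(n):
--         freq = (i+1)*(n-i)
--         if freq % 2 == 1:
--             result ^= arr[i]
--     return result
-- ===== SOURCE B (Python) =====
-- def sansaXor(arr):
--     n = len(arr)
--     if n % 2 == 0:
--         return 0
--     result = 0
--     for i in range(0, n, 2):
--         result ^= arr[i]
--     return result
-- ===== Notes on version B (the rewrite author's own statement) =====
-- stated objective: simpler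
-- what changed: B replaces A's per-index parity test of (i+1)*(n-i) by the closed-form parity fact: the frequency is odd iff n is odd and i is even, so B returns 0 immediately for even-length arrays and otherwise XORs only the even-indexed elements via range(0, n, 2).
import Mathlib
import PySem

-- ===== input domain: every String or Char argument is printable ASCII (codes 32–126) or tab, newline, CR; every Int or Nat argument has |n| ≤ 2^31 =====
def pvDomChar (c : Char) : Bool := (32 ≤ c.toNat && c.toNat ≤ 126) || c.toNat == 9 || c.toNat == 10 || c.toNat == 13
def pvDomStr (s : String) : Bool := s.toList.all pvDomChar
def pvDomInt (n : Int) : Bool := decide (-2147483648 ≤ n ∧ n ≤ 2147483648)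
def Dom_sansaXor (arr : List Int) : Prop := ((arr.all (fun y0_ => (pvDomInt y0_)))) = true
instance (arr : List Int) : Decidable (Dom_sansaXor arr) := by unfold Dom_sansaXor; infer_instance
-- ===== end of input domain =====

-- B replaces A's per-index parity test of (i+1)*(n-i) by its closed form: the frequency is odd
-- iff n is odd and i is even, so B returns 0 for even-length input and otherwise XORs only the
-- even-indexed elements (objective: simpler).

-- ===== PORT A =====
def sansaXor (arr : List Int) : Int :=
  (PySem.List.pyRange 0 (arr.length : Int) 1).foldl
    (fun result i =>
      if PySem.Int.mod ((i + 1) * ((arr.length : Int) - i)) 2 = 1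
      then PySem.Int.bxor result (PySem.List.pyGetD arr i 0)
      else result) 0

-- ===== PORT B =====
def sansaXor_alt (arr : List Int) : Int :=
  if PySem.Int.mod (arr.length : Int) 2 = 0 then 0
  else
    (PySem.List.pyRange 0 (arr.length : Int) 2).foldl
      (fun result i => PySem.Int.bxor result (PySem.List.pyGetD arr i 0)) 0

-- ===== PRECONDITION & SPEC =====
def Spec_sansaXor (arr : List Int) (out : Int) : Prop := out = sansaXor_alt arr
instance (arr : List Int) (out : Int) : Decidable (Spec_sansaXor arr out) := by unfold Spec_sansaXor; infer_instance

-- ===== CLAIM (what is proved, stated in full; the proofs are below) =====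
def Claim_equal_sansaXor : Prop := ∀ (arr : List Int), Dom_sansaXor arr → Spec_sansaXor arr (sansaXor arr)

-- ===== LEMMAS AND PROOFS =====

-- A's loop test, in closed form: (i+1)*(n-i) is odd iff n is odd and i is even.
lemma freq_odd_iff (n i : Int) :
    PySem.Int.mod ((i + 1) * (n - i)) 2 = 1 ↔ (n % 2 = 1 ∧ i % 2 = 0) := by
  rw [PySem.Int.mod_eq_emod_of_pos (by norm_num), ← Int.odd_iff, Int.odd_mul,
    Int.odd_iff, Int.odd_iff]
  omega

lemma pairwise_lt_pyRange_two (n : Int) :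
    List.Pairwise (· < ·) (PySem.List.pyRange 0 n 2) := by
  rw [PySem.List.pyRange_of_pos 0 n (by norm_num)]
  exact (List.pairwise_lt_range).map _ (by intro a b h; omega)

-- the even indices below n, as a list, are exactly range(0, n, 2)
lemma filter_even_pyRange (n : Int) :
    (PySem.List.pyRange 0 n 1).filter (fun i => decide (i % 2 = 0)) =
      PySem.List.pyRange 0 n 2 := by
  have h2 : List.Pairwise (· < ·) (PySem.List.pyRange 0 n 2) := pairwise_lt_pyRange_two n
  have h1 : List.Pairwise (· < ·)
      ((PySem.List.pyRange 0 n 1).filter (fun i => decide (i % 2 = 0))) :=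
    (PySem.List.pairwise_lt_pyRange_one 0 n).sublist (List.filter_sublist (l := PySem.List.pyRange 0 n 1))
  have hperm : ((PySem.List.pyRange 0 n 1).filter (fun i => decide (i % 2 = 0))).Perm
      (PySem.List.pyRange 0 n 2) := by
    rw [List.perm_ext_iff_of_nodup (h1.imp ne_of_lt) (h2.imp ne_of_lt)]
    intro x
    rw [List.mem_filter, PySem.List.mem_pyRange_one,
      PySem.List.mem_pyRange_iff_of_pos (by norm_num)]
    constructor
    · rintro ⟨⟨hx0, hxn⟩, hx⟩
      simp only [decide_eq_true_eq] at hx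
      exact ⟨hx0, hxn, by omega⟩
    · rintro ⟨hx0, hxn, hdvd⟩
      exact ⟨⟨hx0, hxn⟩, by simp only [decide_eq_true_eq]; omega⟩
  exact List.Perm.eq_of_pairwise (fun a b _ _ hab hba => absurd hba (lt_asymm hab)) h1 h2 hperm

-- ===== VERDICT (by name: the statement is the Claim_ definition above) =====
theorem sansaXor_spec : Claim_equal_sansaXor := by
  intro arr _
  unfold Spec_sansaXor sansaXor sansaXor_alt
  rw [PySem.List.foldl_ite_eq_foldl_filter
    (p := fun i => PySem.Int.mod ((i + 1) * ((arr.length : Int) - i)) 2 = 1)]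
  by_cases h : PySem.Int.mod (arr.length : Int) 2 = 0
  · -- even length: the test is never true, so A folds over the empty list
    rw [if_pos h]
    have hmod : (arr.length : Int) % 2 = 0 := by
      rwa [PySem.Int.mod_eq_emod_of_pos (by norm_num)] at h
    have : ((PySem.List.pyRange 0 (arr.length : Int) 1).filter
        (fun i => decide (PySem.Int.mod ((i + 1) * ((arr.length : Int) - i)) 2 = 1))) = [] := by
      rw [List.filter_eq_nil_iff]
      intro i _
      simp only [decide_eq_true_eq, freq_odd_iff]
      omega
    rw [this]; rfl
  · -- odd length: the test holds exactly on the even indices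
    rw [if_neg h]
    have hmod : (arr.length : Int) % 2 = 1 := by
      rw [PySem.Int.mod_eq_emod_of_pos (by norm_num)] at h
      omega
    rw [List.filter_congr (q := fun i => decide (i % 2 = 0))
      (by intro x _; simp only [decide_eq_decide, freq_odd_iff]; omega),
      filter_even_pyRange]
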